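-- pv_equiv track=rewrite | github.com/lukaskostka99/langchain-mcp-client | src/memory_tools.py | _get_date_range
-- ===== SOURCE A (Python) =====
-- def _get_date_range(messages: list) -> str:
--     """Get the date range of messages."""
--     if not messages:
--         return ""
--
--     timestamps = [msg.get("timestamp", "") for msg in messages if msg.get("timestamp")]
--     if not timestamps:
--         return ""
--
--     try:
--         dates = [ts.split(' ')[0] for ts in timestamps]  # Extract date parts
--         min_date = min(dates)
--         max_date = max(dates)
--
--         if min_date == max_date:
--             return min_date
--         else:
--             return f"{min_date} to {max_date}"
--     except (ValueError, IndexError):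
--         return "Various dates"
-- ===== SOURCE B (Python) =====
-- def _get_date_range(messages: list) -> str:
--     """Get the date range of messages (sort the dates, take the endpoints)."""
--     if not messages:
--         return ""
--     dates = sorted(msg.get("timestamp").split(' ')[0]
--                    for msg in messages if msg.get("timestamp"))
--     if not dates:
--         return ""
--     lo, hi = dates[0], dates[-1]
--     return lo if lo == hi else f"{lo} to {hi}"
-- ===== Notes on version B (the rewrite author's own statement) =====
-- stated objective: alternative
-- what changed: Instead of computing min() and max() over a list of dates, B sorts the extracted dates once and reads the range off the sorted list's endpoints (dates[0] / dates[-1]); correct because for strings the first/last element of a sorted list are exactly min/max.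
import Mathlib
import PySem

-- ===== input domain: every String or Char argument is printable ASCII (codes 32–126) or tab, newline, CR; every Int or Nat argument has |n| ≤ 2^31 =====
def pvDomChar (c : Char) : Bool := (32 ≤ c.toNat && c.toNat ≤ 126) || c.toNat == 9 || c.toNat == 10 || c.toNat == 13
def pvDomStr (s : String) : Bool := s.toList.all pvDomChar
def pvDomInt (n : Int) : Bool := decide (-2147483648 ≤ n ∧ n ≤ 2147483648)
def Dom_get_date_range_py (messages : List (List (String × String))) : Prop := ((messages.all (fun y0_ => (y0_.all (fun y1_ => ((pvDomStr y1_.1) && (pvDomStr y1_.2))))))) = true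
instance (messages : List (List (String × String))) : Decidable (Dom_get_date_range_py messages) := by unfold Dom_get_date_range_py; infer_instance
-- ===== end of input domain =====

-- B replaces A's min()/max() scans by sorting the extracted dates once and reading
-- the range off the sorted list's endpoints (alternative algorithm, same task, not claimed faster).

-- ===== PORT A =====
-- [… for … if …] comprehensions as filter+map; min()/max() as PySem.List.min?/max?.
-- ts.split(' ')[0]: split with a nonempty separator never returns an empty list, so the [0]
-- never raises; ported via split? (some since sep ≠ "") and headD "". The `except (ValueError,
-- IndexError)` of A is likewise unreachable (dates is nonempty when min/max run); it is kept as
-- the none-branch below.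
def get_date_range_py (messages : List (List (String × String))) : String :=
  if messages = [] then ""
  else
    let timestamps :=
      (messages.filter (fun msg => (PySem.Dict.mk msg).getD "timestamp" "" ≠ "")).map
        (fun msg => (PySem.Dict.mk msg).getD "timestamp" "")
    if timestamps = [] then ""
    else
      let dates := timestamps.map (fun ts => ((PySem.Str.split? ts " ").getD []).headD "")
      match PySem.List.min? dates (fun x => x), PySem.List.max? dates (fun x => x) with
      | some min_date, some max_date =>
          if min_date = max_date then min_date else min_date ++ " to " ++ max_date
      | _, _ => "Various dates"

-- ===== PORT B =====
-- one comprehension extracting the dates, sorted(); dates[0]/dates[-1] guarded by the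
-- nonemptiness test, ported as headD/getLastD.
def get_date_range_py_alt (messages : List (List (String × String))) : String :=
  if messages = [] then ""
  else
    let dates :=
      PySem.List.sorted
        ((messages.filter (fun msg => (PySem.Dict.mk msg).getD "timestamp" "" ≠ "")).map
          (fun msg => ((PySem.Str.split? ((PySem.Dict.mk msg).getD "timestamp" "") " ").getD []).headD ""))
        (fun x => x) false
    if dates = [] then ""
    else
      let lo := dates.headD ""
      let hi := dates.getLastD ""
      if lo = hi then lo else lo ++ " to " ++ hi

-- ===== PRECONDITION & SPEC =====
def Spec_get_date_range_py (messages : List (List (String × String))) (out : String) : Prop := out = get_date_range_py_alt messages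
instance (messages : List (List (String × String))) (out : String) : Decidable (Spec_get_date_range_py messages out) := by unfold Spec_get_date_range_py; infer_instance

-- ===== CLAIM (what is proved, stated in full; the proofs are below) =====
def Claim_equal_get_date_range_py : Prop := ∀ (messages : List (List (String × String))), Dom_get_date_range_py messages → Spec_get_date_range_py messages (get_date_range_py messages)

-- ===== LEMMAS AND PROOFS =====

-- min of a nonempty string list is the head of its sorted order
lemma min?_eq_sorted_head (l : List String) (h : l ≠ []) :
    PySem.List.min? l (fun x => x) = some ((PySem.List.sorted l (fun x => x) false).headD "") := by
  obtain ⟨m, hm⟩ : ∃ m, PySem.List.min? l (fun x => x) = some m := by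
    cases hmin : PySem.List.min? l (fun x => x) with
    | none => exact absurd ((PySem.List.min?_eq_none_iff l _).mp hmin) h
    | some m => exact ⟨m, rfl⟩
  rw [hm]
  cases hs : PySem.List.sorted l (fun x => x) false with
  | nil => exact absurd ((PySem.List.sorted_eq_nil_iff l _ false).mp hs) h
  | cons a t =>
    have hma : a ≤ m :=
      PySem.List.key_head_sorted_le l (fun x => x) hs m (PySem.List.min?_mem hm)
    have ham : m ≤ a := by
      have : a ∈ l := (PySem.List.mem_sorted l _ false a).mp (by rw [hs]; exact List.mem_cons_self)
      exact PySem.List.min?_isMin hm a this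
    simp [le_antisymm hma ham]

-- max of a nonempty string list is the last element of its sorted order
lemma max?_eq_sorted_last (l : List String) (h : l ≠ []) :
    PySem.List.max? l (fun x => x) = some ((PySem.List.sorted l (fun x => x) false).getLastD "") := by
  obtain ⟨m, hm⟩ : ∃ m, PySem.List.max? l (fun x => x) = some m := by
    cases hmax : PySem.List.max? l (fun x => x) with
    | none => exact absurd ((PySem.List.max?_eq_none_iff l _).mp hmax) h
    | some m => exact ⟨m, rfl⟩
  rw [hm]
  have hsne : PySem.List.sorted l (fun x => x) false ≠ [] := by
    intro hs; exact h ((PySem.List.sorted_eq_nil_iff l _ false).mp hs)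
  set s := PySem.List.sorted l (fun x => x) false with hs
  have hpos : 0 < s.length := List.length_pos_iff.mpr hsne
  have hlast_mem : s.getLast hsne ∈ l := (PySem.List.mem_sorted l _ false _).mp (List.getLast_mem hsne)
  have h1 : s.getLast hsne ≤ m := PySem.List.max?_isMax hm _ hlast_mem
  have h2 : m ≤ s.getLast hsne := by
    have hmem : m ∈ s := (PySem.List.mem_sorted l _ false m).mpr (PySem.List.max?_mem hm)
    obtain ⟨i, hi, hieq⟩ := List.mem_iff_getElem.mp hmem
    have hmono := PySem.List.key_sorted_getElem_mono l (fun x => x)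
      (p := i) (q := s.length - 1) (by omega) (by rw [← hs]; omega)
    have hlast : s.getLast hsne = s[s.length - 1] := List.getLast_eq_getElem hsne
    rw [hlast]
    simpa [← hs, hieq] using hmono
  have hgl : s.getLastD "" = s.getLast hsne := by
    rw [List.getLastD_eq_getLast?, List.getLast?_eq_some_getLast hsne]; rfl
  rw [hgl, le_antisymm h1 h2]

-- ===== VERDICT (by name: the statement is the Claim_ definition above) =====
theorem get_date_range_py_spec : Claim_equal_get_date_range_py := by
  intro messages _
  unfold Spec_get_date_range_py get_date_range_py get_date_range_py_alt
  by_cases hm : messages = []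
  · simp [hm]
  · simp only [hm, if_false, List.map_map]
    have hc : ((fun ts => ((PySem.Str.split? ts " ").getD []).headD "") ∘
        (fun msg => (PySem.Dict.mk msg).getD "timestamp" "")) =
        (fun msg : List (String × String) =>
          ((PySem.Str.split? ((PySem.Dict.mk msg).getD "timestamp" "") " ").getD []).headD "") := rfl
    rw [hc]
    set L := messages.filter (fun msg => (PySem.Dict.mk msg).getD "timestamp" "" ≠ "") with hL
    set D := L.map (fun msg =>
      ((PySem.Str.split? ((PySem.Dict.mk msg).getD "timestamp" "") " ").getD []).headD "") with hD
    by_cases hLnil : L = []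
    · simp [hLnil, hD, PySem.List.sorted_eq_nil_iff]
    · have hTne : L.map (fun msg => (PySem.Dict.mk msg).getD "timestamp" "") ≠ [] := by
        simpa using hLnil
      have hDne : D ≠ [] := by simp [hD, hLnil]
      have hSne : PySem.List.sorted D (fun x => x) false ≠ [] := by
        intro h; exact hDne ((PySem.List.sorted_eq_nil_iff D _ false).mp h)
      rw [if_neg hTne, if_neg hSne, min?_eq_sorted_head D hDne, max?_eq_sorted_last D hDne]
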